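-- pv_equiv track=rewrite | github.com/yasmineimane/CP-Python | 19thProblems.py | multipleOrDivide
-- ===== SOURCE A (Python) =====
-- def multipleOrDivide(n):
--     if n == 1:
--         return -1
--     count = 0
--     while (n > 1):
--         if n % 6 == 0:
--             n //= 6
--         elif n % 3 == 0:
--             n *= 2
--         else:
--             return -1
--         count += 1
--     return count
-- ===== SOURCE B (Python) =====
-- def multipleOrDivide(n):
--     if n <= 0:
--         return 0
--     if n == 1:
--         return -1
--     a, m = _strip(n, 2)
--     b, m = _strip(m, 3)
--     if m == 1 and a <= b:
--         return 2 * b - a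
--     return -1
--
-- def _strip(m, p):
--     a = 0
--     while m % p == 0:
--         m //= p
--         a += 1
--     return a, m
-- ===== Notes on version B (the rewrite author's own statement) =====
-- stated objective: alternative
-- what changed: Replaces the step-by-step divide-by-6 / multiply-by-2 simulation with a factor-counting closed form: strip powers of 2 and 3 and return 2*b - a when the remainder is 1 and a <= b, else -1.
import Mathlib
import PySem

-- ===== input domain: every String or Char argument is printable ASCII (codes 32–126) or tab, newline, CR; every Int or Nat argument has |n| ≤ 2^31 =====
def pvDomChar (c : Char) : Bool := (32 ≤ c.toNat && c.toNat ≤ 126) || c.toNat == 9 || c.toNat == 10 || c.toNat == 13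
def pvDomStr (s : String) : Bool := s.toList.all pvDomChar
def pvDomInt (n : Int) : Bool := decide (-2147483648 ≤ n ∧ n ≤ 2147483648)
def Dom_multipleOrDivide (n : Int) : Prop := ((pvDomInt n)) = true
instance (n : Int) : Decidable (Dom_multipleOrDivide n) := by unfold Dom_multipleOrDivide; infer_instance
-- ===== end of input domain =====

-- B replaces A's step-by-step simulation by a 2/3-factor-counting closed form (2*b - a); alternative algorithm, similar cost.

-- ===== PORT A =====
-- Termination measure lemmas for the two ports' loops (cited by name in decreasing_by,
-- so the definitions stay small).
theorem loopA_dec6 (n : Int) (h1 : 1 < n) (h6 : n % 6 = 0) :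
    (if PySem.Int.floordiv n 6 % 2 = 0 then PySem.Int.floordiv n 6 else 3 * PySem.Int.floordiv n 6).toNat
      < (if n % 2 = 0 then n else 3 * n).toNat := by
  have hfd : PySem.Int.floordiv n 6 = n / 6 := PySem.Int.floordiv_eq_ediv_of_pos (by decide)
  have hcan : 6 * (n / 6) = n := Int.mul_ediv_cancel' (Int.dvd_of_emod_eq_zero h6)
  have hn0 : 0 < n := lt_trans one_pos h1
  have hdvd2 : (2 : Int) ∣ n := ⟨3 * (n / 6), by
    conv_lhs => rw [← hcan]
    ring⟩
  have hn2 : n % 2 = 0 := Int.emod_eq_zero_of_dvd hdvd2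
  have hk0 : 0 ≤ n / 6 := Int.ediv_nonneg (le_of_lt hn0) (by decide)
  have hkpos : 0 < n / 6 := by
    rcases eq_or_lt_of_le hk0 with h0 | h0
    · exact absurd (by rw [← h0, mul_zero] at hcan; exact hcan.symm) (ne_of_gt hn0)
    · exact h0
  rw [hfd, if_pos hn2]
  by_cases h2k : n / 6 % 2 = 0
  · rw [if_pos h2k]
    refine (Int.toNat_lt_toNat hn0).mpr ?_
    calc n / 6 < 6 * (n / 6) := lt_mul_left hkpos (by decide)
    _ = n := hcan
  · rw [if_neg h2k]
    refine (Int.toNat_lt_toNat hn0).mpr ?_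
    calc 3 * (n / 6) < 6 * (n / 6) := mul_lt_mul_of_pos_right (by decide) hkpos
    _ = n := hcan

theorem loopA_dec3 (n : Int) (h1 : 1 < n) (h6 : ¬ n % 6 = 0) (h3 : n % 3 = 0) :
    (if n * 2 % 2 = 0 then n * 2 else 3 * (n * 2)).toNat < (if n % 2 = 0 then n else 3 * n).toNat := by
  have hn0 : 0 < n := lt_trans one_pos h1
  have hn2 : ¬ n % 2 = 0 := by
    intro h2
    refine h6 (Int.emod_eq_zero_of_dvd ?_)
    have hcop : IsCoprime (2 : Int) 3 := ⟨-1, 1, by decide⟩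
    have hd := hcop.mul_dvd (Int.dvd_of_emod_eq_zero h2) (Int.dvd_of_emod_eq_zero h3)
    exact (by decide : (6 : Int) = 2 * 3) ▸ hd
  rw [if_pos (Int.mul_emod_left n 2), if_neg hn2]
  refine (Int.toNat_lt_toNat (mul_pos (by decide) hn0)).mpr ?_
  calc n * 2 = 2 * n := mul_comm n 2
  _ < 3 * n := mul_lt_mul_of_pos_right (by decide) hn0

theorem stripGo_dec (p m : Int) (h : m % p = 0 ∧ 0 < m ∧ 2 ≤ p) :
    (PySem.Int.floordiv m p).toNat < m.toNat := by
  have hfd : PySem.Int.floordiv m p = m / p :=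
    PySem.Int.floordiv_eq_ediv_of_pos (lt_of_lt_of_le (by decide) h.2.2)
  have hq0 : 0 ≤ m / p := Int.ediv_nonneg (le_of_lt h.2.1) (le_trans (by decide) h.2.2)
  have hcan : p * (m / p) = m := Int.mul_ediv_cancel' (Int.dvd_of_emod_eq_zero h.1)
  have hqpos : 0 < m / p := by
    rcases eq_or_lt_of_le hq0 with h0 | h0
    · exact absurd (by rw [← h0, mul_zero] at hcan; exact hcan.symm) (ne_of_gt h.2.1)
    · exact h0
  have hlt : m / p < m := by
    calc m / p < p * (m / p) := lt_mul_left hqpos (lt_of_lt_of_le (by decide) h.2.2)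
    _ = m := hcan
  rw [hfd]
  exact (Int.toNat_lt_toNat h.2.1).mpr hlt

-- Python's while loop; terminates because a divide step shrinks n and a multiply
-- step (only reachable for odd n) makes the next step a divide.
def multipleOrDivideLoop (n count : Int) : Int :=
  if 1 < n then
    if n % 6 = 0 then multipleOrDivideLoop (PySem.Int.floordiv n 6) (count + 1)
    else if n % 3 = 0 then multipleOrDivideLoop (n * 2) (count + 1)
    else -1
  else count
termination_by (if n % 2 = 0 then n else 3 * n).toNat
decreasing_by
  · exact loopA_dec6 n ‹_› ‹_›
  · exact loopA_dec3 n ‹_› ‹_› ‹_›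

def multipleOrDivide (n : Int) : Int :=
  if n = 1 then -1 else multipleOrDivideLoop n 0

-- ===== PORT B =====
-- Python _strip's while loop; the '0 < m ∧ 2 ≤ p' guard only makes it total
-- (B only calls it with positive m and p ∈ {2,3}, where the Python loop terminates too).
def stripGo (p m a : Int) : Int × Int :=
  if m % p = 0 ∧ 0 < m ∧ 2 ≤ p then stripGo p (PySem.Int.floordiv m p) (a + 1)
  else (a, m)
termination_by m.toNat
decreasing_by
  rename_i h
  exact stripGo_dec p m h

def strip (m p : Int) : Int × Int := stripGo p m 0

def multipleOrDivide_alt (n : Int) : Int :=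
  if n ≤ 0 then 0
  else if n = 1 then -1
  else
    let s2 := strip n 2
    let s3 := strip s2.2 3
    if s3.2 = 1 ∧ s2.1 ≤ s3.1 then 2 * s3.1 - s2.1 else -1

-- ===== PRECONDITION & SPEC =====
def Spec_multipleOrDivide (n : Int) (out : Int) : Prop := out = multipleOrDivide_alt n
instance (n : Int) (out : Int) : Decidable (Spec_multipleOrDivide n out) := by unfold Spec_multipleOrDivide; infer_instance

-- ===== CLAIM (what is proved, stated in full; the proofs are below) =====
def Claim_equal_multipleOrDivide : Prop := ∀ (n : Int), Dom_multipleOrDivide n → Spec_multipleOrDivide n (multipleOrDivide n)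

-- ===== LEMMAS AND PROOFS =====

-- stripGo really factors out p: m = p^k * r with r not divisible by p.
theorem stripGo_specN (p : Int) (hp : 2 ≤ p) :
    ∀ (N : ℕ) (m a0 : Int), m.toNat ≤ N → 0 < m →
      ∃ (k : ℕ) (r : Int), stripGo p m a0 = (a0 + (k : Int), r) ∧ m = p ^ k * r ∧ 0 < r ∧ r % p ≠ 0 := by
  intro N
  induction N with
  | zero => intro m a0 hN hm; omega
  | succ N ih =>
    intro m a0 hN hm
    by_cases hmp : m % p = 0
    · have hdvd : p ∣ m := Int.dvd_of_emod_eq_zero hmp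
      have hfe : PySem.Int.floordiv m p = m / p := PySem.Int.floordiv_eq_ediv_of_pos (by omega)
      have hcan : p * (m / p) = m := Int.mul_ediv_cancel' hdvd
      have hqnn : 0 ≤ m / p := Int.ediv_nonneg (by omega) (by omega)
      have hqne : m / p ≠ 0 := by intro h0; rw [h0, mul_zero] at hcan; omega
      have hq0 : 0 < m / p := by omega
      have hlt : m / p < m := by nlinarith
      obtain ⟨k, r, hgo, heq, hr, hrp⟩ := ih (m / p) (a0 + 1) (by omega) hq0
      refine ⟨k + 1, r, ?_, ?_, hr, hrp⟩
      · rw [stripGo, if_pos ⟨hmp, hm, hp⟩, hfe, hgo]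
        exact Prod.ext (by push_cast; ring) rfl
      · rw [pow_succ, mul_comm (p ^ k) p, mul_assoc, ← heq, hcan]
    · refine ⟨0, m, ?_, by ring, hm, hmp⟩
      rw [stripGo, if_neg (by tauto)]
      simp

-- r odd → 2 does not divide 3^b * r; r coprime to 3 → 3 does not divide 2^a * r.
theorem two_not_dvd (b : ℕ) (r : Int) (h2 : r % 2 ≠ 0) : ¬ (2 ∣ 3 ^ b * r) := by
  intro hd
  rcases (Int.prime_two.dvd_mul).mp hd with h | h
  · have : (2 : Int) ∣ 3 := Int.prime_two.dvd_of_dvd_pow h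
    omega
  · omega

theorem three_not_dvd (a : ℕ) (r : Int) (h3 : r % 3 ≠ 0) : ¬ (3 ∣ 2 ^ a * r) := by
  intro hd
  rcases (Int.prime_three.dvd_mul).mp hd with h | h
  · have : (3 : Int) ∣ 2 := Int.prime_three.dvd_of_dvd_pow h
    omega
  · omega

theorem prod_gt_one_of_two_le (x y : Int) (hx : 2 ≤ x) (hy : 0 < y) : 1 < x * y := by nlinarith

theorem two_le_two_pow (a : ℕ) (ha : a ≠ 0) : (2 : Int) ≤ 2 ^ a := by
  calc (2 : Int) = 2 ^ 1 := (pow_one 2).symm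
  _ ≤ 2 ^ a := pow_le_pow_right₀ (by norm_num) (by omega)

-- A's loop on n = 2^a * 3^b * r (r coprime to 6) yields the closed form.
theorem loop_closed :
    ∀ (N : ℕ) (a b : ℕ) (r c : Int), 2 * b + (if a = 0 then 1 else 0) ≤ N →
      0 < r → r % 2 ≠ 0 → r % 3 ≠ 0 →
      multipleOrDivideLoop (2 ^ a * 3 ^ b * r) c =
        if r = 1 ∧ (a : Int) ≤ (b : Int) then c + (2 * (b : Int) - (a : Int)) else -1 := by
  intro N
  induction N with
  | zero =>
    intro a b r c hN hr h2 h3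
    have hb : b = 0 := by omega
    have ha : a ≠ 0 := by by_contra h; simp [h] at hN
    subst hb
    have hnd3 : ¬ (3 : Int) ∣ 2 ^ a * 3 ^ 0 * r := by
      simpa using three_not_dvd a r h3
    have hgt : 1 < 2 ^ a * 3 ^ 0 * r := by
      have h2a := two_le_two_pow a ha
      simp only [pow_zero, mul_one]
      exact prod_gt_one_of_two_le _ _ h2a hr
    rw [multipleOrDivideLoop, if_pos hgt, if_neg (by omega), if_neg (by omega)]
    have hcond : ¬ (r = 1 ∧ (a : Int) ≤ ((0 : ℕ) : Int)) := by
      rintro ⟨_, hle⟩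
      omega
    rw [if_neg hcond]
  | succ N ih =>
    intro a b r c hN hr h2 h3
    by_cases hb : b = 0
    · subst hb
      by_cases htriv : a = 0 ∧ r = 1
      · obtain ⟨ha, hr1⟩ := htriv
        subst ha; subst hr1
        rw [multipleOrDivideLoop]
        norm_num
      · -- dead end: n > 1, not divisible by 3 → -1 on both sides
        have hnd3 : ¬ (3 : Int) ∣ 2 ^ a * 3 ^ 0 * r := by
          simpa using three_not_dvd a r h3
        have hgt : 1 < 2 ^ a * 3 ^ 0 * r := by
          rcases Nat.eq_zero_or_pos a with ha | ha
          · subst ha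
            simp only [pow_zero, one_mul, mul_one]
            have hr1 : r ≠ 1 := fun h => htriv ⟨rfl, h⟩
            omega
          · have h2a := two_le_two_pow a (by omega)
            simp only [pow_zero, mul_one]
            exact prod_gt_one_of_two_le _ _ h2a hr
        rw [multipleOrDivideLoop, if_pos hgt, if_neg (by omega), if_neg (by omega)]
        have hcond : ¬ (r = 1 ∧ (a : Int) ≤ ((0 : ℕ) : Int)) := by
          rintro ⟨hr1, hale⟩
          exact htriv ⟨by omega, hr1⟩
        rw [if_neg hcond]
    · -- b ≥ 1
      have hd3 : (3 : Int) ∣ 2 ^ a * 3 ^ b * r := by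
        have h : (3 : Int) ∣ 3 ^ b := dvd_pow_self 3 hb
        exact (h.mul_left (2 ^ a)).mul_right r
      by_cases ha : a = 0
      · -- odd n divisible by 3: multiply by 2
        subst ha
        have hnd2 : ¬ (2 : Int) ∣ 2 ^ 0 * 3 ^ b * r := by
          simpa [mul_assoc] using two_not_dvd b r h2
        have hgt : 1 < 2 ^ 0 * 3 ^ b * r := by
          have h3b : (3 : Int) ≤ 3 ^ b := by
            calc (3 : Int) = 3 ^ 1 := (pow_one 3).symm
            _ ≤ 3 ^ b := pow_le_pow_right₀ (by norm_num) (by omega)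
          simp only [pow_zero, one_mul]
          exact prod_gt_one_of_two_le _ _ (by omega) hr
        rw [multipleOrDivideLoop, if_pos hgt, if_neg (by omega), if_pos (by omega)]
        have harg : 2 ^ 0 * 3 ^ b * r * 2 = 2 ^ 1 * 3 ^ b * r := by ring
        rw [harg, ih 1 b r (c + 1) (by simp at hN ⊢; omega) hr h2 h3]
        have hb1 : (1 : Int) ≤ (b : Int) := by exact_mod_cast by omega
        have hb0 : ((0 : ℕ) : Int) ≤ (b : Int) := by positivity
        by_cases hr1 : r = 1
        · rw [if_pos ⟨hr1, hb1⟩, if_pos ⟨hr1, hb0⟩]; ring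
        · rw [if_neg (by tauto), if_neg (by tauto)]
      · -- a ≥ 1, b ≥ 1: divide by 6
        obtain ⟨a', rfl⟩ : ∃ a', a = a' + 1 := ⟨a - 1, by omega⟩
        obtain ⟨b', rfl⟩ : ∃ b', b = b' + 1 := ⟨b - 1, by omega⟩
        have hd2 : (2 : Int) ∣ 2 ^ (a' + 1) * 3 ^ (b' + 1) * r := by
          simpa [mul_assoc] using (dvd_pow_self (2 : Int) (by omega : a' + 1 ≠ 0)).mul_right (3 ^ (b' + 1) * r)
        have hd6 : (2 ^ (a' + 1) * 3 ^ (b' + 1) * r) % 6 = 0 := by omega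
        have hgt : 1 < 2 ^ (a' + 1) * 3 ^ (b' + 1) * r := by
          rw [mul_assoc]
          exact prod_gt_one_of_two_le _ _ (two_le_two_pow _ (by omega))
            (mul_pos (pow_pos (by norm_num) _) hr)
        rw [multipleOrDivideLoop, if_pos hgt, if_pos hd6]
        have hsplit : 2 ^ (a' + 1) * 3 ^ (b' + 1) * r = 6 * (2 ^ a' * 3 ^ b' * r) := by ring
        have hfd : PySem.Int.floordiv (2 ^ (a' + 1) * 3 ^ (b' + 1) * r) 6 = 2 ^ a' * 3 ^ b' * r := by
          rw [PySem.Int.floordiv_eq_ediv_of_pos (by norm_num), hsplit,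
            Int.mul_ediv_cancel_left _ (by norm_num)]
        rw [hfd, ih a' b' r (c + 1) (by split_ifs at hN ⊢ <;> omega) hr h2 h3]
        have hcond : ((a' : Int) ≤ (b' : Int)) ↔ (((a' + 1 : ℕ) : Int) ≤ ((b' + 1 : ℕ) : Int)) := by
          push_cast; omega
        by_cases hr1 : r = 1
        · by_cases hab : (a' : Int) ≤ (b' : Int)
          · rw [if_pos ⟨hr1, hab⟩, if_pos ⟨hr1, hcond.mp hab⟩]; push_cast; ring
          · rw [if_neg (by tauto), if_neg (by rw [← hcond] at *; tauto)]
        · rw [if_neg (by tauto), if_neg (by tauto)]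

-- ===== VERDICT (by name: the statement is the Claim_ definition above) =====
theorem multipleOrDivide_spec : Claim_equal_multipleOrDivide := by
  intro n _
  unfold Spec_multipleOrDivide multipleOrDivide multipleOrDivide_alt
  by_cases hn0 : n ≤ 0
  · rw [if_neg (by omega), if_pos hn0, multipleOrDivideLoop, if_neg (by omega)]
  · by_cases hn1 : n = 1
    · rw [if_pos hn1, if_neg hn0, if_pos hn1]
    · -- n ≥ 2
      obtain ⟨a, m, hs2, hn, hm, hm2⟩ := stripGo_specN 2 (le_refl 2) n.toNat n 0 (le_refl _) (by omega)
      obtain ⟨b, r, hs3, hmeq, hr, hr3⟩ := stripGo_specN 3 (by norm_num) m.toNat m 0 (le_refl _) hm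
      have hr2 : r % 2 ≠ 0 := by
        intro h
        have hdm : (2 : Int) ∣ 3 ^ b * r := Dvd.dvd.mul_left (by omega) _
        rw [← hmeq] at hdm
        omega
      have hdecomp : n = 2 ^ a * 3 ^ b * r := by rw [hn, hmeq]; ring
      rw [if_neg hn1, if_neg hn0, if_neg hn1, hdecomp,
        loop_closed (2 * b + (if a = 0 then 1 else 0)) a b r 0 (le_refl _) hr hr2 hr3]
      simp only [strip, ← hdecomp, hs2, hs3]
      by_cases hcond : r = 1 ∧ (a : Int) ≤ (b : Int)
      · rw [if_pos hcond, if_pos (by simpa using hcond)]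
        simp
      · rw [if_neg hcond, if_neg (by simpa using hcond)]
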